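-- pv_equiv track=rewrite | github.com/wzzzd/lm_ner | process/train.py | get_tag_index
-- ===== SOURCE A (Python) =====
-- def get_tag_index(labels, string_tag, tag_method='BMES'):
--     """
--     获取满足标注规则，标签的index
--     labels: 包含标注类别的list
--     string_tag: 标注的类别，如NAME, LOC等
--     tag_method: 标注方法，BIO/BMES
--     """
--     b = 'B-'+string_tag
--     m = 'M-'+string_tag
--     e = 'E-'+string_tag
--     s = 'S-'+string_tag
--     o = 'O'
--
--     target = []
--     tmp = []
--     for i, lab in enumerate(labels):
--         if b == lab:
--             tmp.append(i)
--         elif len(tmp) and m == lab: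
--             tmp.append(i)
--         elif len(tmp) and e == lab:
--             tmp.append(i)
--             tmp = [tmp[0]] + [tmp[-1]]
--             target.append(tmp)
--             tmp = []
--         elif not len(tmp) and s == lab:
--             tmp = [i]
--             target.append(tmp)
--             tmp = []
--     return target
-- ===== SOURCE B (Python) =====
-- def get_tag_index(labels, string_tag, tag_method='BMES'):
--     """Encode labels as a B/E/S/. string, then jump between occurrences with str.find:
--     each span is [first B after the previous close, next E after it]; S singles are
--     collected from the closed segments by comprehension. M labels are never inspected
--     (they cannot change the result)."""
--     b, e, s = 'B-' + string_tag, 'E-' + string_tag, 'S-' + string_tag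
--     enc = ''.join('B' if x == b else 'E' if x == e else 'S' if x == s else '.' for x in labels)
--     out = []
--     pos = 0
--     while True:
--         rel = enc[pos:].find('B')
--         stop = len(enc) if rel == -1 else pos + rel
--         out += [[k] for k in range(pos, stop) if enc[k] == 'S']
--         if rel == -1:
--             return out
--         rel_e = enc[stop + 1:].find('E')
--         if rel_e == -1:
--             return out
--         out.append([stop, stop + 1 + rel_e])
--         pos = stop + rel_e + 2
-- ===== Notes on version B (the rewrite author's own statement) =====
-- stated objective: alternative
-- what changed: Replaces A's single-pass per-label state machine with a staged algorithm: first encode the labels as a B/E/S/. string, then jump between occurrences with str.find (each span is [first B after the previous close, next E after it]), collecting S singles from the closed segments by comprehension; M labels are never inspected.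
import Mathlib
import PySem

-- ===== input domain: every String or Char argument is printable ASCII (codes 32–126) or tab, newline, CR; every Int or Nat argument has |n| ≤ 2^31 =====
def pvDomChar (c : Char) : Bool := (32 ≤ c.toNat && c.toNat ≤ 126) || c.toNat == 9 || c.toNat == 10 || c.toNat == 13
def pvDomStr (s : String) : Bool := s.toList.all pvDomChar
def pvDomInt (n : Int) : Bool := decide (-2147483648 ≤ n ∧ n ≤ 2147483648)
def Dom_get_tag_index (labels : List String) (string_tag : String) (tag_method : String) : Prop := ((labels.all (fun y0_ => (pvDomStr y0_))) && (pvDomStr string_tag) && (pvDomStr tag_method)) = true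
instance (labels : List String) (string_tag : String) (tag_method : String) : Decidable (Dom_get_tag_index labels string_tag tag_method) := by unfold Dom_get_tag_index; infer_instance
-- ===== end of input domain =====

-- B replaces A's label-by-label state machine by a staged algorithm: encode the labels
-- as a B/E/S/. string, then jump between occurrences with str.find; objective: alternative.

-- ===== PORT A =====
-- loop body of A, one step per (i, lab) pair
def pvStepA (b m e s : String) (st : List (List Int) × List Int) (p : Int × String) :
    List (List Int) × List Int :=
  let target := st.1; let tmp := st.2; let i := p.1; let lab := p.2
  if b = lab then (target, tmp ++ [i])
  else if tmp ≠ [] ∧ m = lab then (target, tmp ++ [i])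
  else if tmp ≠ [] ∧ e = lab then
    let tmp' := tmp ++ [i]
    -- tmp[0] and tmp[-1]: tmp' is nonempty here, so pyGetD is exact
    (target ++ [[PySem.List.pyGetD tmp' 0 0, PySem.List.pyGetD tmp' (-1) 0]], [])
  else if tmp = [] ∧ s = lab then (target ++ [[i]], [])
  else (target, tmp)

def get_tag_index (labels : List String) (string_tag : String) (tag_method : String) : List (List Int) :=
  let b := "B-" ++ string_tag
  let m := "M-" ++ string_tag
  let e := "E-" ++ string_tag
  let s := "S-" ++ string_tag
  ((PySem.List.enumerate labels 0).foldl (pvStepA b m e s) ([], [])).1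

-- ===== PORT B =====
-- the ''.join comprehension of Source B: the encoded string, one char per label
def pvEncChar (b e s : String) (x : String) : Char :=
  if x = b then 'B' else if x = e then 'E' else if x = s then 'S' else '.'

-- the while loop of Source B; enc[pos:].find(c) is Chars.find on the dropped suffix,
-- the singles comprehension is a filter/map over range(pos, stop)
-- the while loop of Source B; enc[pos:].find(c) is Chars.find on the dropped suffix,
-- the singles comprehension is a filter/map over range(pos, stop).  The fuel
-- argument only makes the recursion structural: enc.length + 2 is always enough
-- (pos strictly increases and stays ≤ enc.length + 1; proved in pvScan_spec below).
def pvScan (enc : List Char) (fuel : Nat) (pos : Nat) (out : List (List Int)) : List (List Int) :=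
  match fuel with
  | 0 => out
  | fuel + 1 =>
    let rel : Int := PySem.Chars.find (enc.drop pos) ['B']
    let stop : Nat := if rel = -1 then enc.length else pos + rel.toNat
    let out' := out ++ ((PySem.List.pyRange (pos : Int) (stop : Int) 1).filter
        (fun k => PySem.List.pyGetD enc k ' ' == 'S')).map (fun k => ([k] : List Int))
    if rel = -1 then out'
    else
      let rel_e : Int := PySem.Chars.find (enc.drop (stop + 1)) ['E']
      if rel_e = -1 then out'
      else pvScan enc fuel (stop + rel_e.toNat + 2) (out' ++ [[(stop : Int), (stop : Int) + 1 + rel_e]])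

def get_tag_index_alt (labels : List String) (string_tag : String) (tag_method : String) : List (List Int) :=
  let b := "B-" ++ string_tag
  let e := "E-" ++ string_tag
  let s := "S-" ++ string_tag
  pvScan (labels.map (pvEncChar b e s)) ((labels.map (pvEncChar b e s)).length + 2) 0 []

-- ===== PRECONDITION & SPEC =====
def Spec_get_tag_index (labels : List String) (string_tag : String) (tag_method : String) (out : List (List Int)) : Prop := out = get_tag_index_alt labels string_tag tag_method
instance (labels : List String) (string_tag : String) (tag_method : String) (out : List (List Int)) : Decidable (Spec_get_tag_index labels string_tag tag_method out) := by unfold Spec_get_tag_index; infer_instance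

-- ===== CLAIM (what is proved, stated in full; the proofs are below) =====
def Claim_equal_get_tag_index : Prop := ∀ (labels : List String) (string_tag : String) (tag_method : String), Dom_get_tag_index labels string_tag tag_method → Spec_get_tag_index labels string_tag tag_method (get_tag_index labels string_tag tag_method)

-- ===== LEMMAS AND PROOFS =====

-- canonical spec both programs are reduced to: a two-phase recursive reading of the encoded labels
mutual
def pvSpecC : List Char → Int → List (List Int)
  | [], _ => []
  | c :: cs, i =>
    if c = 'B' then pvSpecO cs (i + 1) i
    else if c = 'S' then [i] :: pvSpecC cs (i + 1)
    else pvSpecC cs (i + 1)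
def pvSpecO : List Char → Int → Int → List (List Int)
  | [], _, _ => []
  | c :: cs, i, st =>
    if c = 'E' then [st, i] :: pvSpecC cs (i + 1)
    else pvSpecO cs (i + 1) st
end

def pvSingles : List Char → Int → List (List Int)
  | [], _ => []
  | c :: cs, i => (if c = 'S' then [[i]] else []) ++ pvSingles cs (i + 1)

theorem pv_m_ne_e (t : String) : ("M-" ++ t) ≠ ("E-" ++ t) := by
  intro h
  have h2 : ("M-" ++ t).toList = ("E-" ++ t).toList := by rw [h]
  simp [String.toList_append] at h2

theorem pv_m_ne_s (t : String) : ("M-" ++ t) ≠ ("S-" ++ t) := by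
  intro h
  have h2 : ("M-" ++ t).toList = ("S-" ++ t).toList := by rw [h]
  simp [String.toList_append] at h2

theorem pv_s_ne_e (t : String) : ("S-" ++ t) ≠ ("E-" ++ t) := by
  intro h
  have h2 : ("S-" ++ t).toList = ("E-" ++ t).toList := by rw [h]
  simp [String.toList_append] at h2

theorem pv_find_none {l : List Char} {c : Char}
    (h : PySem.Chars.find l [c] = -1) : c ∉ l := by
  intro hmem
  obtain ⟨s, t, rfl⟩ := List.append_of_mem hmem
  exact ((PySem.Chars.find_eq_neg_one_iff _ _).mp h) ⟨s, t, by simp⟩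

theorem pv_find_char {l : List Char} {c : Char}
    (h : ¬ PySem.Chars.find l [c] = -1) :
    ∃ r : Nat, PySem.Chars.find l [c] = (r : Int) ∧ r < l.length ∧
      l = l.take r ++ c :: l.drop (r + 1) ∧ c ∉ l.take r := by
  have h0 : 0 ≤ PySem.Chars.find l [c] := by
    have := PySem.Chars.neg_one_le_find l [c]; omega
  obtain ⟨hpre, hmin⟩ := PySem.Chars.find_spec h0
  obtain ⟨t, ht⟩ := hpre
  have hdrop : l.drop (PySem.Chars.find l [c]).toNat = c :: t := by simpa using ht.symm
  have hrlen : (PySem.Chars.find l [c]).toNat < l.length := by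
    have hlen := congrArg List.length hdrop
    simp [List.length_drop] at hlen
    omega
  refine ⟨(PySem.Chars.find l [c]).toNat, by omega, hrlen, ?_, ?_⟩
  · have ht' : t = l.drop ((PySem.Chars.find l [c]).toNat + 1) := by
      have h2 := congrArg (List.drop 1) hdrop
      rw [List.drop_drop] at h2
      simp at h2
      exact h2.symm
    conv_lhs => rw [← List.take_append_drop (PySem.Chars.find l [c]).toNat l]
    rw [hdrop, ht']
  · intro hmem
    obtain ⟨j, hj, hjc⟩ := List.getElem_of_mem hmem
    have hj2 : j < (PySem.Chars.find l [c]).toNat ∧ j < l.length := by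
      simp [List.length_take] at hj
      omega
    apply hmin j hj2.1
    refine ⟨l.drop (j + 1), ?_⟩
    rw [List.getElem_take] at hjc
    simp [← hjc, ← List.drop_eq_getElem_cons hj2.2]

theorem pvSpecC_no_B {l : List Char} (h : 'B' ∉ l) :
    ∀ i, pvSpecC l i = pvSingles l i := by
  induction l with
  | nil => intro i; simp [pvSpecC, pvSingles]
  | cons c cs ih =>
    intro i
    have hc : c ≠ 'B' := fun hc => h (hc ▸ List.mem_cons_self ..)
    have hcs : 'B' ∉ cs := fun hm => h (List.mem_cons_of_mem _ hm)
    by_cases hS : c = 'S' <;> simp [pvSpecC, pvSingles, hc, hS, ih hcs]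

theorem pvSpecO_no_E {l : List Char} (h : 'E' ∉ l) :
    ∀ i st, pvSpecO l i st = [] := by
  induction l with
  | nil => intro i st; simp [pvSpecO]
  | cons c cs ih =>
    intro i st
    have hc : c ≠ 'E' := fun hc => h (hc ▸ List.mem_cons_self ..)
    have hcs : 'E' ∉ cs := fun hm => h (List.mem_cons_of_mem _ hm)
    simp [pvSpecO, hc, ih hcs]

theorem pvSpecC_split {seg : List Char} (rest : List Char) (h : 'B' ∉ seg) :
    ∀ i : Int, pvSpecC (seg ++ 'B' :: rest) i
      = pvSingles seg i ++ pvSpecO rest (i + seg.length + 1) (i + seg.length) := by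
  induction seg with
  | nil => intro i; simp [pvSpecC, pvSingles]
  | cons c cs ih =>
    intro i
    have hc : c ≠ 'B' := fun hc => h (hc ▸ List.mem_cons_self ..)
    have hcs : 'B' ∉ cs := fun hm => h (List.mem_cons_of_mem _ hm)
    have harith1 : i + 1 + (cs.length : Int) + 1 = i + ((cs.length : Nat) + 1 : Nat) + 1 := by
      push_cast; ring
    have harith2 : i + 1 + (cs.length : Int) = i + ((cs.length : Nat) + 1 : Nat) := by
      push_cast; ring
    by_cases hS : c = 'S' <;>
      simp [pvSpecC, pvSingles, hc, hS, ih hcs, harith1, harith2]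

theorem pvSpecO_split {seg : List Char} (rest : List Char) (h : 'E' ∉ seg) :
    ∀ (i st : Int), pvSpecO (seg ++ 'E' :: rest) i st
      = [st, i + seg.length] :: pvSpecC rest (i + seg.length + 1) := by
  induction seg with
  | nil => intro i st; simp [pvSpecO]
  | cons c cs ih =>
    intro i st
    have hc : c ≠ 'E' := fun hc => h (hc ▸ List.mem_cons_self ..)
    have hcs : 'E' ∉ cs := fun hm => h (List.mem_cons_of_mem _ hm)
    have harith1 : i + 1 + (cs.length : Int) + 1 = i + ((cs.length : Nat) + 1 : Nat) + 1 := by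
      push_cast; ring
    have harith2 : i + 1 + (cs.length : Int) = i + ((cs.length : Nat) + 1 : Nat) := by
      push_cast; ring
    simp [pvSpecO, hc, ih hcs, harith1, harith2]

-- the singles comprehension over range(pos, pos+n) equals pvSingles of that segment
theorem pvComp_singles (enc : List Char) :
    ∀ (n pos : Nat), pos + n ≤ enc.length →
      ((PySem.List.pyRange (pos : Int) ((pos : Int) + (n : Int)) 1).filter
          (fun k => PySem.List.pyGetD enc k ' ' == 'S')).map (fun k => ([k] : List Int))
        = pvSingles ((enc.drop pos).take n) (pos : Int) := by
  intro n
  induction n with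
  | zero =>
    intro pos _
    simp [PySem.List.pyRange, pvSingles]
  | succ n ih =>
    intro pos hlen
    have hpos : pos < enc.length := by omega
    rw [PySem.List.pyRange_one_cons (by omega)]
    rw [List.drop_eq_getElem_cons hpos, List.take_succ_cons]
    have hget : PySem.List.pyGetD enc (pos : Int) ' ' = enc[pos] := by
      rw [PySem.List.pyGetD_natCast]
      simp [List.getD_eq_getElem?_getD, List.getElem?_eq_getElem hpos]
    have hrange : (pos : Int) + 1 = ((pos + 1 : Nat) : Int) := by push_cast; ring
    have hstop : (pos : Int) + ((n + 1 : Nat) : Int) = ((pos + 1 : Nat) : Int) + (n : Nat) := by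
      push_cast; ring
    rw [hstop, hrange, List.filter_cons]
    have ihx := ih (pos + 1) (by omega)
    by_cases hS : enc[pos] = 'S'
    · simp only [hget, hS, beq_self_eq_true, if_true, List.map_cons, pvSingles, ihx, hrange,
        List.singleton_append]
    · have hb : (enc[pos] == 'S') = false := by simp [hS]
      simp only [hget, hb, Bool.false_eq_true, if_false, pvSingles, hS, ihx, hrange]
      simp [hS]

-- B's port computes the spec: the find-jumping loop appended to its accumulator
theorem pvScan_spec (enc : List Char) :
    ∀ (fuel pos : Nat), pos ≤ enc.length + 1 → enc.length + 2 - pos ≤ fuel → ∀ out,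
      pvScan enc fuel pos out = out ++ pvSpecC (enc.drop pos) (pos : Int) := by
  intro fuel
  induction fuel with
  | zero => intro pos hpos h out; exact absurd h (by omega)
  | succ fuel ih =>
    intro pos hposlen _ out
    rw [pvScan]
    by_cases hrel : PySem.Chars.find (enc.drop pos) ['B'] = -1
    · -- no B left: only singles remain
      have hnoB : 'B' ∉ enc.drop pos := pv_find_none hrel
      simp only [hrel, if_pos, dif_pos]
      rw [pvSpecC_no_B hnoB]
      by_cases hle : pos ≤ enc.length
      · have hcast : ((enc.length : Nat) : Int) = (pos : Int) + ((enc.length - pos : Nat) : Int) := by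
          omega
        rw [hcast, pvComp_singles enc (enc.length - pos) pos (by omega)]
        rw [List.take_of_length_le (by simp)]
      · have hdrop : enc.drop pos = [] := List.drop_eq_nil_of_le (by omega)
        have hrange : PySem.List.pyRange (pos : Int) (enc.length : Int) 1 = [] := by
          simp [PySem.List.pyRange]; omega
        simp [hdrop, hrange, pvSingles]
    · obtain ⟨r, hr, hrlen, hdecomp, hnoB⟩ := pv_find_char hrel
      have hrtoNat : (PySem.Chars.find (enc.drop pos) ['B']).toNat = r := by omega
      have hposlen : pos + r < enc.length := by
        have := List.length_drop (l := enc) (i := pos); omega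
      -- stop = pos + r; enc.drop (stop+1) = (enc.drop pos).drop (r+1)
      have hdd : enc.drop (pos + r + 1) = (enc.drop pos).drop (r + 1) := by
        rw [List.drop_drop]; congr 1 <;> omega
      have hsingles :
          ((PySem.List.pyRange (pos : Int) ((pos + r : Nat) : Int) 1).filter
              (fun k => PySem.List.pyGetD enc k ' ' == 'S')).map (fun k => ([k] : List Int))
            = pvSingles ((enc.drop pos).take r) (pos : Int) := by
        have hcast : ((pos + r : Nat) : Int) = (pos : Int) + (r : Int) := by push_cast; ring
        rw [hcast, pvComp_singles enc r pos (by omega)]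
      have hsplit : pvSpecC (enc.drop pos) (pos : Int)
          = pvSingles ((enc.drop pos).take r) (pos : Int)
            ++ pvSpecO ((enc.drop pos).drop (r + 1)) ((pos : Int) + r + 1) ((pos : Int) + r) := by
        conv_lhs => rw [hdecomp]
        rw [pvSpecC_split _ hnoB]
        have hlen : (((enc.drop pos).take r).length : Int) = (r : Int) := by
          simp [List.length_take]; omega
        rw [hlen]
      simp only [hrel, dif_neg, if_neg, hrtoNat, not_false_iff]
      by_cases hrele : PySem.Chars.find (enc.drop (pos + r + 1)) ['E'] = -1
      · -- unclosed trailing B-run: discard it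
        have hnoE : 'E' ∉ (enc.drop pos).drop (r + 1) := by
          rw [← hdd]; exact pv_find_none hrele
        simp only [hrele, dif_pos]
        rw [hsingles, hsplit, pvSpecO_no_E hnoE]
        simp
      · obtain ⟨q, hq, hqlen, hqdecomp, hnoE⟩ := pv_find_char (l := enc.drop (pos + r + 1)) hrele
        have hqtoNat : (PySem.Chars.find (enc.drop (pos + r + 1)) ['E']).toNat = q := by omega
        have hqposlen : pos + r + 1 + q < enc.length := by
          have := List.length_drop (l := enc) (i := pos + r + 1); omega
        simp only [hrele, dif_neg, not_false_iff, hqtoNat]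
        rw [ih (pos + r + q + 2) (by omega) (by omega)]
        rw [hsingles, hsplit]
        have hrest : (enc.drop pos).drop (r + 1) = enc.drop (pos + r + 1) := hdd.symm
        rw [hrest]
        conv_rhs => rw [hqdecomp]
        rw [pvSpecO_split _ hnoE]
        have hdd2 : enc.drop (pos + r + q + 2) = (enc.drop (pos + r + 1)).drop (q + 1) := by
          rw [List.drop_drop]; congr 1 <;> omega
        rw [hdd2]
        have hlen2 : (((enc.drop (pos + r + 1)).take q).length : Int) = (q : Int) := by
          simp [List.length_take]; omega
        rw [hlen2]
        have e3 : ((pos + r + q + 2 : Nat) : Int) = (pos : Int) + r + 1 + q + 1 := by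
          push_cast; ring
        rw [hq, e3]
        simp [List.append_assoc]

-- A's port computes the spec: invariant over the fold, closed (tmp = []) and
-- open (tmp = x :: xs, with x the head tmp[0]) phases together
theorem pvA_spec (b m e s : String) (hme : m ≠ e) (hms : m ≠ s) (hse : s ≠ e) :
    ∀ (labels : List String) (i : Int) (target : List (List Int)) (tmp : List Int),
      (tmp = [] → ((PySem.List.enumerate labels i).foldl (pvStepA b m e s) (target, tmp)).1
          = target ++ pvSpecC (labels.map (pvEncChar b e s)) i)
      ∧ (∀ x xs, tmp = x :: xs →
          ((PySem.List.enumerate labels i).foldl (pvStepA b m e s) (target, tmp)).1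
          = target ++ pvSpecO (labels.map (pvEncChar b e s)) i x) := by
  intro labels
  induction labels with
  | nil =>
    intro i target tmp
    constructor
    · intro _; simp [PySem.List.enumerate, pvSpecC]
    · intro x xs _; simp [PySem.List.enumerate, pvSpecO]
  | cons lab labels ih =>
    intro i target tmp
    rw [PySem.List.enumerate_cons]
    simp only [List.foldl_cons, List.map_cons]
    constructor
    · -- closed phase
      rintro rfl
      by_cases hb : lab = b
      · rw [show pvStepA b m e s (target, []) (i, lab) = (target, [i]) by
            simp [pvStepA, hb]]
        rw [(ih (i + 1) target [i]).2 i [] rfl]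
        simp [pvEncChar, pvSpecC, hb]
      · by_cases hs : s = lab
        · have hlabe : ¬ lab = e := fun h => hse (hs.trans h)
          rw [show pvStepA b m e s (target, []) (i, lab) = (target ++ [[i]], []) by
              simp only [pvStepA]
              rw [if_neg (fun h => hb h.symm)]
              simp [hs]]
          rw [(ih (i + 1) (target ++ [[i]]) []).1 rfl]
          have henc : pvEncChar b e s lab = 'S' := by
            unfold pvEncChar
            rw [if_neg hb, if_neg hlabe, if_pos hs.symm]
          simp [henc, pvSpecC]
        · rw [show pvStepA b m e s (target, []) (i, lab) = (target, []) by
              simp only [pvStepA]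
              rw [if_neg (fun h => hb h.symm)]
              simp [hs]]
          rw [(ih (i + 1) target []).1 rfl]
          have hencB : ¬ pvEncChar b e s lab = 'B' := by
            unfold pvEncChar
            rw [if_neg hb]
            split_ifs <;> simp_all
          have hencS : ¬ pvEncChar b e s lab = 'S' := by
            unfold pvEncChar
            rw [if_neg hb]
            split_ifs <;> simp_all
          conv_rhs => rw [show pvSpecC (pvEncChar b e s lab :: labels.map (pvEncChar b e s)) i
              = pvSpecC (labels.map (pvEncChar b e s)) (i + 1) by
            simp [pvSpecC, hencB, hencS]]
    · -- open phase: tmp = x :: xs, x = tmp[0]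
      rintro x xs rfl
      by_cases hb : lab = b
      · rw [show pvStepA b m e s (target, x :: xs) (i, lab) = (target, x :: (xs ++ [i])) by
            simp [pvStepA, hb]]
        rw [(ih (i + 1) target (x :: (xs ++ [i]))).2 x (xs ++ [i]) rfl]
        simp [pvEncChar, pvSpecO, hb]
      · by_cases hm : m = lab
        · have hlabe : ¬ lab = e := fun h => hme (hm.trans h)
          have hlabs : ¬ lab = s := fun h => hms (hm.trans h)
          rw [show pvStepA b m e s (target, x :: xs) (i, lab) = (target, x :: (xs ++ [i])) by
              simp only [pvStepA]
              rw [if_neg (fun h => hb h.symm)]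
              simp [hm]]
          rw [(ih (i + 1) target (x :: (xs ++ [i]))).2 x (xs ++ [i]) rfl]
          have henc : pvEncChar b e s lab = '.' := by
            unfold pvEncChar
            rw [if_neg hb, if_neg hlabe, if_neg hlabs]
          simp [henc, pvSpecO]
        · by_cases he : e = lab
          · rw [show pvStepA b m e s (target, x :: xs) (i, lab)
                = (target ++ [[x, i]], []) by
              simp only [pvStepA]
              rw [if_neg (fun h => hb h.symm),
                  if_neg (fun h => hm h.2),
                  if_pos ⟨by simp, he⟩]
              have h0 : PySem.List.pyGetD ((x :: xs) ++ [i]) 0 0 = x := by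
                rw [PySem.List.pyGetD_zero]; simp
              have h1 : PySem.List.pyGetD ((x :: xs) ++ [i]) (-1) 0 = i :=
                PySem.List.pyGetD_neg_one_append_singleton (x :: xs) i 0
              rw [h0, h1]]
            rw [(ih (i + 1) (target ++ [[x, i]]) []).1 rfl]
            have henc : pvEncChar b e s lab = 'E' := by
              unfold pvEncChar
              rw [if_neg hb, if_pos he.symm]
            simp [henc, pvSpecO]
          · rw [show pvStepA b m e s (target, x :: xs) (i, lab) = (target, x :: xs) by
                simp only [pvStepA]
                rw [if_neg (fun h => hb h.symm)]
                simp [hm, he]]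
            rw [(ih (i + 1) target (x :: xs)).2 x xs rfl]
            have hencE : ¬ pvEncChar b e s lab = 'E' := by
              unfold pvEncChar
              rw [if_neg hb]
              split_ifs <;> simp_all
            conv_rhs => rw [show pvSpecO (pvEncChar b e s lab :: labels.map (pvEncChar b e s)) i x
                = pvSpecO (labels.map (pvEncChar b e s)) (i + 1) x by
              simp [pvSpecO, hencE]]

-- ===== VERDICT (by name: the statement is the Claim_ definition above) =====
theorem get_tag_index_spec : Claim_equal_get_tag_index := by
  intro labels t tm _
  unfold Spec_get_tag_index
  have hme : ("M-" ++ t) ≠ ("E-" ++ t) := pv_m_ne_e t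
  have hms : ("M-" ++ t) ≠ ("S-" ++ t) := pv_m_ne_s t
  have hse : ("S-" ++ t) ≠ ("E-" ++ t) := pv_s_ne_e t
  have hA : get_tag_index labels t tm
      = ((PySem.List.enumerate labels 0).foldl
          (pvStepA ("B-" ++ t) ("M-" ++ t) ("E-" ++ t) ("S-" ++ t)) ([], [])).1 := rfl
  have hB : get_tag_index_alt labels t tm
      = pvScan (labels.map (pvEncChar ("B-" ++ t) ("E-" ++ t) ("S-" ++ t)))
          ((labels.map (pvEncChar ("B-" ++ t) ("E-" ++ t) ("S-" ++ t))).length + 2) 0 [] := rfl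
  rw [hA, hB,
    (pvA_spec ("B-" ++ t) ("M-" ++ t) ("E-" ++ t) ("S-" ++ t) hme hms hse labels 0 [] []).1 rfl,
    pvScan_spec (labels.map (pvEncChar ("B-" ++ t) ("E-" ++ t) ("S-" ++ t)))
      ((labels.map (pvEncChar ("B-" ++ t) ("E-" ++ t) ("S-" ++ t))).length + 2) 0
      (by omega) (by omega) []]
  simp
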